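-- pv_equiv track=rewrite | github.com/namest504/Algorithm | 프로그래머스/3/12938. 최고의 집합/최고의 집합.py | solution
-- ===== SOURCE A (Python) =====
-- def solution(n, s):
--     answer = []
--     for i in range(n) :
--         if s // n == 0 :
--             return [-1]
--         answer.append(s // n)
--
--     for i in range(s % n) :
--         answer[i] += 1
--     answer.sort()
--     return answer
-- ===== SOURCE B (Python) =====
-- def solution(n, s):
--     # Greedy one-pass construction: repeatedly emit the floor of the average
--     # of what remains (remaining // k for k = n, n-1, ..., 1).  Each step the
--     # emitted value is the smallest element of the optimal multiset of the
--     # remaining sum, so the list comes out sorted with no sort pass.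
--     if n <= 0:
--         return []
--     if s // n == 0:
--         return [-1]
--     out = []
--     remaining = s
--     for k in range(n, 0, -1):
--         x = remaining // k
--         out.append(x)
--         remaining -= x
--     return out
-- ===== Notes on version B (the rewrite author's own statement) =====
-- stated objective: alternative
-- what changed: B replaces A's three staged passes (fill a list with s//n, increment the first s%n entries, sort) by a single greedy pass that emits remaining//k for k = n down to 1, which produces the answer already sorted with no second pass and no sort; measured run time is the same.
-- outside the precondition, e.g. on solution(0, 5): A raises ZeroDivisionError, B returns []
import Mathlib
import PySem

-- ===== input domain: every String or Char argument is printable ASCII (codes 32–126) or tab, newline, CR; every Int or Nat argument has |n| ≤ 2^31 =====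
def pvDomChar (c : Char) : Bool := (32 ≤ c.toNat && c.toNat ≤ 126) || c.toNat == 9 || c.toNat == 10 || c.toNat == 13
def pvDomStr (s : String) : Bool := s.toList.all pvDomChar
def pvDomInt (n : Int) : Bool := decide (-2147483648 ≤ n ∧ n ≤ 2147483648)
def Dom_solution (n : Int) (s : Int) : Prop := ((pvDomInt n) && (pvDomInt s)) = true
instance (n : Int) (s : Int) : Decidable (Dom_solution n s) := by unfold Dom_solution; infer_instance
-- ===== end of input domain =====

-- B builds the answer in one greedy pass (emit remaining // k for k = n..1, which
-- comes out already sorted) instead of A's build / increment-prefix / sort;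
-- equivalence of the RETURN value is proved for all n ≠ 0 (A raises at n = 0).

-- ===== PORT A =====
-- first loop: for i in range(n): if s//n == 0: return [-1] else append s//n
def solLoop1 (q : Int) (iters : Nat) (acc : List Int) : Option (List Int) :=
  match iters with
  | 0 => some acc
  | Nat.succ t => if q = 0 then none else solLoop1 q t (acc ++ [q])

-- second loop: for i in range(s % n): answer[i] += 1
def solLoop2 (idxs : List Int) (answer : List Int) : List Int :=
  match idxs with
  | [] => answer
  | i :: t => solLoop2 t (PySem.List.pySetD answer i (PySem.List.pyGetD answer i 0 + 1))

def solution (n : Int) (s : Int) : List Int :=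
  match solLoop1 (PySem.Int.floordiv s n) n.toNat [] with
  | none => [-1]
  | some answer =>
      PySem.List.sorted (solLoop2 (PySem.List.pyRange 0 (PySem.Int.mod s n) 1) answer) (fun x => x) false

-- ===== PORT B =====
-- the loop 'for k in range(n, 0, -1): x = remaining // k; out.append(x); remaining -= x'
def bLoop : Nat → Int → List Int → List Int
  | 0, _, acc => acc
  | Nat.succ t, m, acc =>
      let x := PySem.Int.floordiv m ((t : Int) + 1)
      bLoop t (m - x) (acc ++ [x])

def solution_alt (n : Int) (s : Int) : List Int :=
  if n ≤ 0 then []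
  else if PySem.Int.floordiv s n = 0 then [-1]
  else bLoop n.toNat s []

-- ===== PRECONDITION & SPEC =====
-- Pre_ excludes exactly n = 0, on which Python A raises ZeroDivisionError (s // 0).
def Pre_solution (n : Int) (s : Int) : Prop := n ≠ 0
instance (n : Int) (s : Int) : Decidable (Pre_solution n s) := by unfold Pre_solution; infer_instance
def pvWitness_solution : Int × Int := (3, 7)

def Spec_solution (n : Int) (s : Int) (out : List Int) : Prop := out = solution_alt n s
instance (n : Int) (s : Int) (out : List Int) : Decidable (Spec_solution n s out) := by unfold Spec_solution; infer_instance

-- ===== CLAIM (what is proved, stated in full; the proofs are below) =====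
def Claim_equal_solution : Prop := ∀ (n : Int) (s : Int), Dom_solution n s → Pre_solution n s → Spec_solution n s (solution n s)

-- ===== LEMMAS AND PROOFS =====

theorem solLoop1_ne_zero (q : Int) (hq : q ≠ 0) (iters : Nat) (acc : List Int) :
    solLoop1 q iters acc = some (acc ++ List.replicate iters q) := by
  induction iters generalizing acc with
  | zero => simp [solLoop1]
  | succ t ih => simp [solLoop1, hq, ih, List.replicate_succ]

theorem solLoop1_zero (q : Int) (hq : q = 0) (t : Nat) (acc : List Int) :
    solLoop1 q (t + 1) acc = none := by
  simp [solLoop1, hq]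

-- incrementing positions 0, 1, …, r-1 of a list of r ≤ k copies of q
theorem solLoop2_replicate (q : Int) (k r : Nat) (hrk : r ≤ k) :
    solLoop2 (PySem.List.pyRange 0 (r : Int) 1) (List.replicate k q) =
      List.replicate r (q + 1) ++ List.replicate (k - r) q := by
  suffices h : ∀ (a : Nat), a ≤ r →
      solLoop2 (PySem.List.pyRange (a : Int) (r : Int) 1)
        (List.replicate a (q + 1) ++ List.replicate (k - a) q) =
      List.replicate r (q + 1) ++ List.replicate (k - r) q by
    simpa using h 0 (Nat.zero_le r)
  intro a ha
  induction hd : r - a generalizing a with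
  | zero =>
    have : a = r := by omega
    subst this
    rw [PySem.List.pyRange_one_eq_nil le_rfl]
    rfl
  | succ m ih =>
    have har : (a : Int) < (r : Int) := by exact_mod_cast (by omega : a < r)
    rw [PySem.List.pyRange_one_cons har]
    show solLoop2 _ (PySem.List.pySetD _ _ _) = _
    have hset : PySem.List.pySetD
        (List.replicate a (q + 1) ++ List.replicate (k - a) q) (a : Int)
        (PySem.List.pyGetD (List.replicate a (q + 1) ++ List.replicate (k - a) q) (a : Int) 0 + 1) =
        List.replicate (a + 1) (q + 1) ++ List.replicate (k - (a + 1)) q := by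
      have hget : PySem.List.pyGetD
          (List.replicate a (q + 1) ++ List.replicate (k - a) q) (a : Int) 0 = q := by
        rw [PySem.List.pyGetD_natCast]
        rw [List.getD_eq_getElem?_getD, List.getElem?_append_right (by simp)]
        simp [List.getElem?_replicate]
        rw [if_pos (by omega)]
        rfl
      rw [hget, PySem.List.pySetD_natCast]
      apply List.ext_getElem
      · simp; omega
      · intro i h1 h2
        by_cases hia : i < a
        · rw [List.getElem_set_ne (by omega)]
          rw [List.getElem_append_left (by simpa), List.getElem_append_left (by simp only [List.length_replicate, List.length_append, List.length_set] <;> omega)]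
          simp
        · by_cases hie : i = a
          · subst hie
            rw [List.getElem_set_self (by simp only [List.length_replicate, List.length_append, List.length_set] <;> omega)]
            rw [List.getElem_append_left (by simp only [List.length_replicate, List.length_append, List.length_set] <;> omega)]
            simp
          · rw [List.getElem_set_ne (by omega)]
            rw [List.getElem_append_right (by simp only [List.length_replicate, List.length_append, List.length_set] <;> omega),
                List.getElem_append_right (by simp only [List.length_replicate, List.length_append, List.length_set] <;> omega)]
            simp
    rw [hset]
    have : ((a : Int) + 1) = ((a + 1 : Nat) : Int) := by push_cast; ring
    rw [this]
    exact ih (a + 1) (by omega) (by omega)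

theorem sorted_two_blocks (q : Int) (u v : Nat) :
    PySem.List.sorted (List.replicate u (q + 1) ++ List.replicate v q) (fun x => x) false =
      List.replicate v q ++ List.replicate u (q + 1) := by
  apply PySem.List.eq_of_perm_of_pairwise_le_of_injective (fun x => x) (fun _ _ h => h)
  · exact (PySem.List.sorted_perm _ _ _).trans List.perm_append_comm
  · exact PySem.List.sorted_pairwise _ _
  · refine List.pairwise_append.mpr ⟨?_, ?_, ?_⟩
    · exact List.pairwise_replicate.mpr (Or.inr le_rfl)
    · exact List.pairwise_replicate.mpr (Or.inr le_rfl)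
    · intro a ha b hb
      rw [List.eq_of_mem_replicate ha, List.eq_of_mem_replicate hb]
      omega

-- n < 0: A returns []
theorem solution_neg (n s : Int) (hn : n < 0) : solution n s = [] := by
  unfold solution
  have h0 : n.toNat = 0 := by omega
  rw [h0]
  have hb := PySem.Int.mod_neg_bounds s hn
  rw [PySem.List.pyRange_one_eq_nil hb.2]
  rfl

-- the greedy loop produces exactly (k - r) copies of q then r copies of q+1
theorem bLoop_char (k : Nat) (hk : 0 < k) (m : Int) (acc : List Int) :
    bLoop k m acc =
      acc ++ List.replicate (k - (PySem.Int.mod m (k : Int)).toNat) (PySem.Int.floordiv m (k : Int))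
          ++ List.replicate ((PySem.Int.mod m (k : Int)).toNat) (PySem.Int.floordiv m (k : Int) + 1) := by
  induction k generalizing m acc with
  | zero => omega
  | succ t ih =>
    set q := PySem.Int.floordiv m ((t : Int) + 1) with hqdef
    have hkpos : (0 : Int) < (t : Int) + 1 := by positivity
    have hmod := PySem.Int.floordiv_mul_add_mod m ((t : Int) + 1)
    have hr0 : 0 ≤ PySem.Int.mod m ((t : Int) + 1) := PySem.Int.mod_nonneg m hkpos
    have hrlt : PySem.Int.mod m ((t : Int) + 1) < (t : Int) + 1 := PySem.Int.mod_lt m hkpos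
    set r := PySem.Int.mod m ((t : Int) + 1) with hrdef
    have hcast : ((t + 1 : Nat) : Int) = (t : Int) + 1 := by push_cast; ring
    rcases Nat.eq_zero_or_pos t with ht0 | htpos
    · -- k = 1
      subst ht0
      have hq : q = m := by
        rw [hqdef]; simpa using PySem.Int.floordiv_eq_ediv_of_pos (a := m) (by norm_num)
      have hrz : r.toNat = 0 := by omega
      show bLoop 0 (m - q) (acc ++ [q]) = _
      rw [bLoop, hcast, ← hrdef, ← hqdef, hrz]
      simp [hq]
    · -- k = t + 1, t ≥ 1
      show bLoop t (m - q) (acc ++ [q]) = _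
      rw [ih htpos (m - q) (acc ++ [q]), hcast, ← hrdef, ← hqdef]
      have htpos' : (0 : Int) < (t : Int) := by exact_mod_cast htpos
      -- m - q = q * t + r
      have hm' : m - q = q * (t : Int) + r := by linear_combination -hmod
      by_cases hcase : r = (t : Int)
      · -- carry case: m - q = (q+1) * t
        have hq' : PySem.Int.floordiv (m - q) (t : Int) = q + 1 := by
          rw [PySem.Int.floordiv_eq_iff_of_pos htpos']
          constructor
          · nlinarith
          · nlinarith
        have hr' : PySem.Int.mod (m - q) (t : Int) = 0 := by
          have h := PySem.Int.floordiv_mul_add_mod (m - q) (t : Int)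
          rw [hq'] at h
          nlinarith
        rw [hq', hr']
        have hz : ((0 : Int)).toNat = 0 := rfl
        have hrt2 : r.toNat = t := by omega
        have h1 : t + 1 - t = 1 := by omega
        rw [hz, hrt2, h1, List.replicate_succ]
        simp
      · -- no carry: quotient stays q, remainder stays r
        have hrt : r < (t : Int) := by omega
        have hq' : PySem.Int.floordiv (m - q) (t : Int) = q := by
          rw [PySem.Int.floordiv_eq_iff_of_pos htpos']
          constructor
          · nlinarith
          · nlinarith
        have hr' : PySem.Int.mod (m - q) (t : Int) = r := by
          have h := PySem.Int.floordiv_mul_add_mod (m - q) (t : Int)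
          rw [hq'] at h
          nlinarith
        rw [hq', hr']
        have h1 : t + 1 - r.toNat = (t - r.toNat) + 1 := by omega
        rw [h1, List.replicate_succ]
        simp

-- ===== VERDICT (by name: the statement is the Claim_ definition above) =====
theorem solution_spec : Claim_equal_solution := by
  intro n s _ hpre
  unfold Spec_solution
  rcases lt_trichotomy n 0 with hn | hn | hn
  · rw [solution_neg n s hn]
    unfold solution_alt
    rw [if_pos (le_of_lt hn)]
  · exact absurd hn hpre
  · -- n > 0
    unfold solution solution_alt
    rw [if_neg (by omega)]
    set q := PySem.Int.floordiv s n with hq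
    by_cases hq0 : q = 0
    · obtain ⟨t, ht⟩ : ∃ t, n.toNat = t + 1 := ⟨n.toNat - 1, by omega⟩
      rw [ht, solLoop1_zero _ hq0]
      simp [hq0]
    · rw [solLoop1_ne_zero _ hq0]
      simp only [List.nil_append, if_neg hq0]
      have hr0 : 0 ≤ PySem.Int.mod s n := PySem.Int.mod_nonneg s hn
      have hrn : PySem.Int.mod s n < n := PySem.Int.mod_lt s hn
      have hrcast : PySem.Int.mod s n = ((PySem.Int.mod s n).toNat : Int) := by omega
      rw [hrcast, solLoop2_replicate q (n.toNat) ((PySem.Int.mod s n).toNat) (by omega)]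
      rw [sorted_two_blocks]
      have hcast : ((n.toNat : Nat) : Int) = n := by omega
      rw [bLoop_char n.toNat (by omega) s [], hcast, ← hq]
      simp
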